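-- pv_equiv track=rewrite | github.com/toshima/binarysearchproblems | factorialsum.py | solve
-- ===== SOURCE A (Python) =====
-- def solve(n):
--     k = 1
--     while n:
--         if n % k <= 1:
--             n //= k
--         else:
--             return False
--         k += 1
--     return True
-- ===== SOURCE B (Python) =====
-- def solve(n):
--     # Build the table of factorials <= n, then greedily subtract them descending.
--     fs = []
--     f, k = 1, 1
--     while f <= n:
--         fs.append(f)
--         k += 1
--         f *= k
--     for f in reversed(fs):
--         if f <= n:
--             n -= f
--     return n == 0
-- ===== Notes on version B (the rewrite author's own statement) =====
-- stated objective: alternative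
-- what changed: A checks factorial-base digits by ascending division (n %= k, n //= k); B precomputes the ascending factorial table once and decides by a single greedy descending subtraction pass, returning n == 0.
import Mathlib
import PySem

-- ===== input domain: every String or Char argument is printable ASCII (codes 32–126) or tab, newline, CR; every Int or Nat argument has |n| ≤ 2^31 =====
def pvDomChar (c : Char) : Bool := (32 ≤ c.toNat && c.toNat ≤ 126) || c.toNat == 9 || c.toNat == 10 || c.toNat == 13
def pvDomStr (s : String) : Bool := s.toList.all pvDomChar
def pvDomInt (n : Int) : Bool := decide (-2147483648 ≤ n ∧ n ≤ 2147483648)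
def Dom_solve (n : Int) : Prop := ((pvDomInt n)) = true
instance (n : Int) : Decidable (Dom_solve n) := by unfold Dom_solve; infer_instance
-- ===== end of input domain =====

-- B replaces A's ascending factorial-base digit extraction by a precomputed factorial
-- table plus one greedy descending subtraction pass (alternative algorithm, same cost).

-- ===== PORT A =====
-- A's while-loop: fuel is only a totality guard (proved sufficient below); each step
-- checks n % k <= 1 and does n //= k, k += 1.
def pyGoA : Nat → Int → Int → Bool
  | 0, _, _ => true
  | fuel+1, n, k =>
    if n = 0 then true
    else if PySem.Int.mod n k ≤ 1 then pyGoA fuel (PySem.Int.floordiv n k) (k + 1)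
    else false

def solve (n : Int) : Bool := pyGoA (n.natAbs + 4) n 1

-- ===== PORT B =====
-- Source B's build loop: while f <= n: append f; k += 1; f *= k.  (fuel = totality guard)
def buildB : Nat → Int → Int → Int → List Int
  | 0, _, _, _ => []
  | fuel+1, n, f, k => if f ≤ n then f :: buildB fuel n (f * (k + 1)) (k + 1) else []

def solve_alt (n : Int) : Bool :=
  let fs := buildB (n.toNat + 2) n 1 1
  decide ((fs.reverse).foldl (fun r f => if f ≤ r then r - f else r) n = 0)

-- ===== PRECONDITION & SPEC =====
def Spec_solve (n : Int) (out : Bool) : Prop := out = solve_alt n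
instance (n : Int) (out : Bool) : Decidable (Spec_solve n out) := by unfold Spec_solve; infer_instance

-- ===== CLAIM (what is proved, stated in full; the proofs are below) =====
def Claim_equal_solve : Prop := ∀ (n : Int), Dom_solve n → Spec_solve n (solve n)

-- ===== LEMMAS AND PROOFS =====

-- ℕ model of A's loop from k = j+2 on (digit check in the factorial number system).
def ga (n j : ℕ) : Bool :=
  if h : n = 0 then true
  else if n % (j + 2) ≤ 1 then ga (n / (j + 2)) (j + 1)
  else false
termination_by n
decreasing_by exact Nat.div_lt_self (Nat.pos_of_ne_zero h) (by omega)

-- ℕ model of B's table: factorials (j+1)!, (j+2)!, … while ≤ n.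
def tbl (n j : ℕ) : List ℕ :=
  if h : Nat.factorial (j + 1) ≤ n then Nat.factorial (j + 1) :: tbl n (j + 1) else []
termination_by n + 1 - Nat.factorial (j + 1)
decreasing_by
  have h4 : Nat.factorial (j + 1) < Nat.factorial (j + 1 + 1) :=
    (Nat.factorial_lt (by omega)).mpr (by omega)
  omega

-- ℕ model of B's subtraction pass.
def subN (l : List ℕ) (r : ℕ) : ℕ := l.foldl (fun r f => if f ≤ r then r - f else r) r

-- descending factorial list m!, (m-1)!, …, 1!
def dsc : ℕ → List ℕ
  | 0 => []
  | m + 1 => Nat.factorial (m + 1) :: dsc m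

-- n is a sum of distinct factorials with indices ≥ m (the common spec).
def RepF (m n : ℕ) : Prop :=
  ∃ s : Finset ℕ, (∀ i ∈ s, m ≤ i) ∧ (∑ i ∈ s, Nat.factorial i) = n

lemma sum_fact_lt (m : ℕ) :
    (∑ i ∈ Finset.range m, Nat.factorial (i + 1)) < Nat.factorial (m + 1) := by
  induction m with
  | zero => simp [Nat.factorial]
  | succ m ih =>
    rw [Finset.sum_range_succ]
    have h2 : Nat.factorial (m + 2) = (m + 2) * Nat.factorial (m + 1) := rfl
    have := Nat.factorial_pos (m + 1)
    nlinarith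

lemma dvd_sum_fact (m : ℕ) (s : Finset ℕ) (h : ∀ i ∈ s, m ≤ i) :
    Nat.factorial m ∣ ∑ i ∈ s, Nat.factorial i :=
  Finset.dvd_sum fun i hi => Nat.factorial_dvd_factorial (h i hi)

-- the factorial-base digit of a representation is forced
lemma rep_digit (j n : ℕ) (s : Finset ℕ) (h1 : ∀ i ∈ s, j + 1 ≤ i)
    (hs : (∑ i ∈ s, Nat.factorial i) = n * Nat.factorial (j + 1)) :
    (if j + 1 ∈ s then 1 else 0) = n % (j + 2) ∧
    (∑ i ∈ s.erase (j + 1), Nat.factorial i) = (n / (j + 2)) * Nat.factorial (j + 2) := by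
  have herge : ∀ i ∈ s.erase (j + 1), j + 2 ≤ i := by
    intro i hi
    have hne := Finset.ne_of_mem_erase hi
    have := h1 i (Finset.mem_of_mem_erase hi)
    omega
  obtain ⟨c, hc⟩ := dvd_sum_fact (j + 2) (s.erase (j + 1)) herge
  have hsplit : (∑ i ∈ s, Nat.factorial i) =
      (if j + 1 ∈ s then 1 else 0) * Nat.factorial (j + 1) + ∑ i ∈ s.erase (j + 1), Nat.factorial i := by
    by_cases hm : j + 1 ∈ s
    · rw [if_pos hm, one_mul, ← Finset.add_sum_erase s _ hm]
    · rw [if_neg hm, zero_mul, zero_add, Finset.erase_eq_of_notMem hm]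
  set ε : ℕ := if j + 1 ∈ s then 1 else 0 with hε
  have hεle : ε ≤ 1 := by rw [hε]; split <;> omega
  have hfs : Nat.factorial (j + 2) = (j + 2) * Nat.factorial (j + 1) := rfl
  have hpos := Nat.factorial_pos (j + 1)
  -- n = ε + c * (j+2)
  have hkey : n = ε + c * (j + 2) := by
    have : (ε + c * (j + 2)) * Nat.factorial (j + 1) = n * Nat.factorial (j + 1) := by
      rw [← hs, hsplit, hc, hfs]; ring
    exact (Nat.eq_of_mul_eq_mul_right hpos this).symm
  have hmod : n % (j + 2) = ε := by
    rw [hkey, Nat.add_mul_mod_self_right, Nat.mod_eq_of_lt (by omega)]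
  have hdiv : n / (j + 2) = c := by
    rw [hkey, Nat.add_mul_div_right _ _ (by omega : 0 < j + 2), Nat.div_eq_of_lt (by omega), zero_add]
  refine ⟨hmod.symm, ?_⟩
  rw [hc, hdiv, hfs, Nat.mul_comm]

-- A's loop decides representability by factorials ≥ (j+1)! of n·(j+1)!
lemma ga_iff (n : ℕ) : ∀ j, ga n j = true ↔
    ∃ s : Finset ℕ, (∀ i ∈ s, j + 1 ≤ i) ∧ (∑ i ∈ s, Nat.factorial i) = n * Nat.factorial (j + 1) := by
  induction n using Nat.strong_induction_on with
  | _ n ih =>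
    intro j
    rw [ga]
    by_cases h0 : n = 0
    · subst h0
      simp only [dif_pos]
      constructor
      · intro _; exact ⟨∅, by simp, by simp⟩
      · intro _; trivial
    · rw [dif_neg h0]
      by_cases hd : n % (j + 2) ≤ 1
      · rw [if_pos hd]
        have hlt : n / (j + 2) < n := Nat.div_lt_self (Nat.pos_of_ne_zero h0) (by omega)
        rw [ih _ hlt (j + 1)]
        constructor
        · rintro ⟨s', hge', hsum'⟩
          by_cases h1 : n % (j + 2) = 1
          · have hmem : j + 1 ∉ s' := fun hm => by have := hge' _ hm; omega
            refine ⟨insert (j + 1) s', ?_, ?_⟩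
            · intro i hi
              rcases Finset.mem_insert.mp hi with rfl | hi
              · omega
              · have := hge' i hi; omega
            · rw [Finset.sum_insert hmem, hsum']
              have hdm := Nat.div_add_mod n (j + 2)
              have hn : (j + 2) * (n / (j + 2)) + 1 = n := by omega
              have hfs : Nat.factorial (j + 1 + 1) = (j + 2) * Nat.factorial (j + 1) := rfl
              rw [hfs]
              calc Nat.factorial (j + 1) + n / (j + 2) * ((j + 2) * Nat.factorial (j + 1))
                  = ((j + 2) * (n / (j + 2)) + 1) * Nat.factorial (j + 1) := by ring
                _ = n * Nat.factorial (j + 1) := by rw [hn]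
          · have h00 : n % (j + 2) = 0 := by omega
            refine ⟨s', fun i hi => by have := hge' i hi; omega, ?_⟩
            rw [hsum']
            have hdm := Nat.div_add_mod n (j + 2)
            have hn : (j + 2) * (n / (j + 2)) = n := by omega
            have hfs : Nat.factorial (j + 1 + 1) = (j + 2) * Nat.factorial (j + 1) := rfl
            rw [hfs]
            calc n / (j + 2) * ((j + 2) * Nat.factorial (j + 1))
                = ((j + 2) * (n / (j + 2))) * Nat.factorial (j + 1) := by ring
              _ = n * Nat.factorial (j + 1) := by rw [hn]
        · rintro ⟨s, hge, hsum⟩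
          obtain ⟨_, h2⟩ := rep_digit j n s hge hsum
          exact ⟨s.erase (j + 1), fun i hi => by
            have := hge i (Finset.mem_of_mem_erase hi)
            have := Finset.ne_of_mem_erase hi
            omega, h2⟩
      · rw [if_neg hd]
        simp only [Bool.false_eq_true, false_iff]
        rintro ⟨s, hge, hsum⟩
        obtain ⟨h1, _⟩ := rep_digit j n s hge hsum
        split at h1 <;> omega

lemma foldl_sub_ge (l : List ℕ) : ∀ r, r - l.sum ≤ l.foldl (fun r f => if f ≤ r then r - f else r) r := by
  induction l with
  | nil => intro r; simp
  | cons f l ih =>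
    intro r
    have h1 := ih (r - f)
    have h2 := ih r
    simp only [List.foldl_cons, List.sum_cons]
    split
    · omega
    · omega

lemma subN_ge (l : List ℕ) (r : ℕ) : r - l.sum ≤ subN l r := foldl_sub_ge l r

lemma dsc_sum (m : ℕ) : (dsc m).sum = ∑ i ∈ Finset.range m, Nat.factorial (i + 1) := by
  induction m with
  | zero => simp [dsc]
  | succ m ih => rw [dsc, List.sum_cons, ih, Finset.sum_range_succ]; ring

lemma rep_mem_lt (s : Finset ℕ) (r M : ℕ) (hs : (∑ i ∈ s, Nat.factorial i) = r)
    (hr : r < Nat.factorial M) : ∀ i ∈ s, i < M := by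
  intro i hi
  by_contra hM
  push_neg at hM
  have h1 : Nat.factorial i ≤ r := hs ▸ Finset.single_le_sum (fun i _ => Nat.zero_le _) hi
  have h2 : Nat.factorial M ≤ Nat.factorial i := Nat.factorial_le hM
  omega

lemma rep_sum_le (s : Finset ℕ) (m : ℕ) (h : ∀ i ∈ s, 1 ≤ i ∧ i ≤ m) :
    (∑ i ∈ s, Nat.factorial i) ≤ ∑ i ∈ Finset.range m, Nat.factorial (i + 1) := by
  have hsub : s ⊆ Finset.Icc 1 m := by
    intro i hi
    obtain ⟨h1, h2⟩ := h i hi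
    exact Finset.mem_Icc.mpr ⟨h1, h2⟩
  calc (∑ i ∈ s, Nat.factorial i)
      ≤ ∑ i ∈ Finset.Icc 1 m, Nat.factorial i := Finset.sum_le_sum_of_subset hsub
    _ = ∑ i ∈ Finset.range (m + 1 - 1), Nat.factorial (1 + i) := by
        rw [← Finset.sum_Ico_eq_sum_range]
        apply Finset.sum_congr
        · ext x
          simp only [Finset.mem_Icc, Finset.mem_Ico]
          omega
        · intro x _
          rfl
    _ = ∑ i ∈ Finset.range m, Nat.factorial (i + 1) := by
        apply Finset.sum_congr (by norm_num)
        intro i _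
        congr 1
        omega

-- greedy descending subtraction decides representability
lemma greedy_iff (m : ℕ) : ∀ r, r < Nat.factorial (m + 1) →
    ((subN (dsc m) r = 0) ↔ RepF 1 r) := by
  induction m with
  | zero =>
    intro r hr
    have hr0 : r = 0 := by
      have hr2 := hr
      norm_num [Nat.factorial] at hr2
      omega
    subst hr0
    simp only [dsc, subN, List.foldl_nil]
    constructor
    · intro _; exact ⟨∅, by simp, by simp⟩
    · intro _; trivial
  | succ m ih =>
    intro r hr
    have hstep : subN (dsc (m + 1)) r =
        subN (dsc m) (if Nat.factorial (m + 1) ≤ r then r - Nat.factorial (m + 1) else r) := by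
      simp only [dsc, subN, List.foldl_cons]
    by_cases h1 : Nat.factorial (m + 1) ≤ r
    · rw [hstep, if_pos h1]
      set r' := r - Nat.factorial (m + 1) with hr'
      by_cases h2 : r' < Nat.factorial (m + 1)
      · rw [ih r' h2]
        constructor
        · rintro ⟨s', hge, hs⟩
          have hlt := rep_mem_lt s' r' (m + 1) hs h2
          have hmem : m + 1 ∉ s' := fun hm => by have := hlt _ hm; omega
          refine ⟨insert (m + 1) s', ?_, ?_⟩
          · intro i hi
            rcases Finset.mem_insert.mp hi with rfl | hi
            · omega
            · exact hge i hi
          · rw [Finset.sum_insert hmem, hs]; omega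
        · rintro ⟨s, hge, hs⟩
          have hlt := rep_mem_lt s r (m + 2) hs hr
          have hmem : m + 1 ∈ s := by
            by_contra hm
            have hb : ∀ i ∈ s, 1 ≤ i ∧ i ≤ m := by
              intro i hi
              have := hge i hi; have := hlt i hi
              have : i ≠ m + 1 := fun h => hm (h ▸ hi)
              omega
            have := rep_sum_le s m hb
            have := sum_fact_lt m
            omega
          refine ⟨s.erase (m + 1), fun i hi => hge i (Finset.mem_of_mem_erase hi), ?_⟩
          have := Finset.add_sum_erase s Nat.factorial hmem
          omega
      · -- r ≥ 2·(m+1)!: both sides false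
        push_neg at h2
        constructor
        · intro hz
          exfalso
          have hsum := dsc_sum m
          have hlt := sum_fact_lt m
          have := subN_ge (dsc m) r'
          omega
        · rintro ⟨s, hge, hs⟩
          exfalso
          have hlt := rep_mem_lt s r (m + 2) hs hr
          have hb : ∀ i ∈ s, 1 ≤ i ∧ i ≤ m + 1 := by
            intro i hi; exact ⟨hge i hi, by have := hlt i hi; omega⟩
          have h3 := rep_sum_le s (m + 1) hb
          rw [Finset.sum_range_succ] at h3
          have := sum_fact_lt m
          omega
    · rw [hstep, if_neg h1]
      push_neg at h1
      exact ih r h1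

-- the table really is the ascending factorial list
lemma tbl_eq_map : ∀ (m j n : ℕ), (∀ i < m, Nat.factorial (j + 1 + i) ≤ n) →
    n < Nat.factorial (j + 1 + m) →
    tbl n j = (List.range m).map (fun i => Nat.factorial (j + 1 + i)) := by
  intro m
  induction m with
  | zero =>
    intro j n _ hub
    rw [tbl, dif_neg (by simpa using Nat.not_le.mpr hub)]
    simp
  | succ m ih =>
    intro j n hlb hub
    have h0 : Nat.factorial (j + 1) ≤ n := by simpa using hlb 0 (by omega)
    rw [tbl, dif_pos h0]
    have hrec := ih (j + 1) n
      (fun i hi => by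
        have hh := hlb (i + 1) (by omega)
        have he : j + 1 + (i + 1) = j + 1 + 1 + i := by omega
        rwa [he] at hh)
      (by
        have he : j + 1 + (m + 1) = j + 1 + 1 + m := by omega
        rwa [he] at hub)
    rw [hrec, List.range_succ_eq_map, List.map_cons, List.map_map]
    have hhead : Nat.factorial (j + 1 + 0) = Nat.factorial (j + 1) := by norm_num
    have htail : ((fun i => Nat.factorial (j + 1 + i)) ∘ Nat.succ) =
        fun i => Nat.factorial (j + 1 + 1 + i) := by
      funext i
      simp only [Function.comp_apply]
      congr 1
      omega
    rw [hhead, htail]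

lemma reverse_map_range (m : ℕ) :
    ((List.range m).map (fun i => Nat.factorial (1 + i))).reverse = dsc m := by
  induction m with
  | zero => simp [dsc]
  | succ m ih =>
    rw [List.range_succ, List.map_append, List.reverse_append]
    simp only [List.map_cons, List.map_nil, List.reverse_cons, List.reverse_nil, List.nil_append,
      List.singleton_append]
    have h1 : 1 + m = m + 1 := by omega
    rw [dsc, ← ih, h1]

lemma exists_bound (n : ℕ) : ∃ m, (∀ i < m, Nat.factorial (1 + i) ≤ n) ∧ n < Nat.factorial (1 + m) := by
  have hex : ∃ m, n < Nat.factorial (1 + m) := by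
    refine ⟨n, ?_⟩
    calc n < n + 1 := by omega
      _ ≤ Nat.factorial (n + 1) := Nat.self_le_factorial _
      _ = Nat.factorial (1 + n) := by rw [Nat.add_comm]
  refine ⟨Nat.find hex, ?_, Nat.find_spec hex⟩
  intro i hi
  exact Nat.le_of_not_lt fun hlt => Nat.find_min hex hi hlt

-- ℕ-level equivalence of the two algorithms
lemma main_nat (n : ℕ) : ga n 0 = decide (subN ((tbl n 0).reverse) n = 0) := by
  obtain ⟨m, hlb, hub⟩ := exists_bound n
  have htbl : tbl n 0 = (List.range m).map (fun i => Nat.factorial (1 + i)) := by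
    have := tbl_eq_map m 0 n (by simpa using hlb) (by simpa using hub)
    simpa using this
  rw [htbl, reverse_map_range]
  have hA := ga_iff n 0
  have hB := greedy_iff m n (by
    have : (1 : ℕ) + m = m + 1 := by omega
    rw [this] at hub; exact hub)
  have hAB : ga n 0 = true ↔ RepF 1 n := by
    rw [hA]
    unfold RepF
    constructor
    · rintro ⟨s, h1, h2⟩; exact ⟨s, h1, by simpa [Nat.factorial] using h2⟩
    · rintro ⟨s, h1, h2⟩; exact ⟨s, h1, by simpa [Nat.factorial] using h2⟩
  rw [← hB] at hAB
  cases hga : ga n 0 with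
  | true => exact (decide_eq_true (hAB.mp hga)).symm
  | false =>
    symm
    apply decide_eq_false
    intro hsub
    have hcontr := hAB.mpr hsub
    simp [hga] at hcontr

-- ===== bridges between the Int ports and the ℕ models =====

lemma goA_pos (n : ℕ) : ∀ (fuel j : ℕ), n + 1 ≤ fuel → pyGoA fuel (n : ℤ) ((j : ℤ) + 2) = ga n j := by
  induction n using Nat.strong_induction_on with
  | _ n ih =>
    intro fuel j hfuel
    obtain ⟨f, rfl⟩ : ∃ f, fuel = f + 1 := ⟨fuel - 1, by omega⟩
    rw [pyGoA, ga]
    by_cases h0 : n = 0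
    · subst h0; simp
    · rw [if_neg (by exact_mod_cast h0), dif_neg h0]
      have hcast2 : ((j : ℤ) + 2) = ((j + 2 : ℕ) : ℤ) := by push_cast; ring
      have hmod : PySem.Int.mod (n : ℤ) ((j : ℤ) + 2) = ((n % (j + 2) : ℕ) : ℤ) := by
        rw [hcast2]; exact PySem.Int.mod_natCast n (j + 2)
      have hdiv : PySem.Int.floordiv (n : ℤ) ((j : ℤ) + 2) = ((n / (j + 2) : ℕ) : ℤ) := by
        rw [hcast2]; exact PySem.Int.floordiv_natCast n (j + 2)
      rw [hmod, hdiv]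
      by_cases hd : n % (j + 2) ≤ 1
      · rw [if_pos (by exact_mod_cast hd), if_pos hd]
        have hlt : n / (j + 2) < n := Nat.div_lt_self (Nat.pos_of_ne_zero h0) (by omega)
        have hc : ((j : ℤ) + 2) + 1 = ((j + 1 : ℕ) : ℤ) + 2 := by push_cast; ring
        rw [hc]
        exact ih _ hlt f (j + 1) (by omega)
      · rw [if_neg (by exact_mod_cast hd), if_neg hd]

lemma pymod_bounds (n k : ℤ) (hk : 0 < k) : 0 ≤ PySem.Int.mod n k ∧ PySem.Int.mod n k < k :=
  ⟨PySem.Int.mod_nonneg n hk, PySem.Int.mod_lt n hk⟩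

lemma goA_neg (a : ℕ) : ∀ fuel (n k : ℤ), n.natAbs = a → n < 0 → 2 ≤ k →
    a + 2 ≤ fuel → pyGoA fuel n k = false := by
  induction a using Nat.strong_induction_on with
  | _ a ih =>
    intro fuel n k ha hn hk hfuel
    obtain ⟨f, rfl⟩ : ∃ f, fuel = f + 1 := ⟨fuel - 1, by omega⟩
    rw [pyGoA, if_neg (by omega)]
    have hkpos : (0 : ℤ) < k := by omega
    obtain ⟨hm0, hm1⟩ := pymod_bounds n k hkpos
    by_cases hd : PySem.Int.mod n k ≤ 1
    · rw [if_pos hd]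
      have hid := PySem.Int.floordiv_mul_add_mod n k
      set q := PySem.Int.floordiv n k with hq
      set d := PySem.Int.mod n k with hdm
      -- q < 0
      have hqneg : q < 0 := by
        by_contra hq0
        push_neg at hq0
        have hnn : 0 ≤ q * k := mul_nonneg hq0 (by omega)
        omega
      by_cases hone : n = -1
      · -- n = -1: d = k - 1 ≤ 1 forces k = 2, q = -1; next step gives digit 2
        have hmul := mul_le_mul_of_nonneg_right (show q ≤ -1 by omega) (show (0 : ℤ) ≤ k by omega)
        have hqk : q * k ≤ -k := by linarith
        have hk2 : k = 2 := by
          rw [hone] at hid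
          omega
        have hq1 : q = -1 := by
          rw [hone, hk2] at hid
          omega
        obtain ⟨g, rfl⟩ : ∃ g, f = g + 1 := ⟨f - 1, by omega⟩
        rw [hq1, hk2]
        have h3 : PySem.Int.mod (-1) (2 + 1) = 2 := by decide
        rw [pyGoA, if_neg (by norm_num), h3, if_neg (by norm_num)]
      · -- |n| ≥ 2: |q| < |n|
        have hn2 : n ≤ -2 := by omega
        have habs : q.natAbs < n.natAbs := by
          by_cases hq1 : q = -1
          · rw [hq1]; omega
          · have hq2 : q ≤ -2 := by omega
            have hkq : k * q ≤ 2 * q := mul_le_mul_of_nonpos_right hk (by omega)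
            have hid2 : k * q + d = n := by rw [mul_comm]; exact hid
            have hlt : n < q := by omega
            omega
        have hqn : q < 0 := hqneg
        exact ih q.natAbs (ha ▸ habs) f q (k + 1) rfl hqn (by omega) (by omega)
    · rw [if_neg hd]

lemma solve_nonneg (n : ℕ) : solve (n : ℤ) = ga n 0 := by
  unfold solve
  have hna : ((n : ℤ)).natAbs = n := Int.natAbs_natCast n
  rw [hna]
  rw [pyGoA]
  by_cases h0 : n = 0
  · subst h0
    rw [ga]; simp
  · rw [if_neg (by exact_mod_cast h0)]
    have hm : PySem.Int.mod (n : ℤ) 1 = 0 := by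
      obtain ⟨h1, h2⟩ := pymod_bounds (n : ℤ) 1 (by omega)
      omega
    have hdv : PySem.Int.floordiv (n : ℤ) 1 = (n : ℤ) := by
      have := PySem.Int.floordiv_mul_add_mod (n : ℤ) 1
      rw [hm] at this; omega
    rw [hm, hdv, if_pos (by omega)]
    have : (1 : ℤ) + 1 = ((0 : ℕ) : ℤ) + 2 := by norm_num
    rw [this]
    exact goA_pos n (n + 3) 0 (by omega)

lemma buildB_eq (n : ℕ) : ∀ fuel j, n + 2 ≤ Nat.factorial (j + 1) + fuel →
    buildB fuel (n : ℤ) ((Nat.factorial (j + 1) : ℕ) : ℤ) ((j : ℤ) + 1) =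
      (tbl n j).map (Nat.cast : ℕ → ℤ) := by
  intro fuel
  induction fuel with
  | zero =>
    intro j hf
    rw [tbl, dif_neg (by omega)]
    simp [buildB]
  | succ f ih =>
    intro j hf
    rw [buildB, tbl]
    by_cases h : Nat.factorial (j + 1) ≤ n
    · rw [if_pos (by exact_mod_cast h), dif_pos h, List.map_cons]
      congr 1
      have hmul : ((Nat.factorial (j + 1) : ℕ) : ℤ) * (((j : ℤ) + 1) + 1) =
          ((Nat.factorial (j + 2) : ℕ) : ℤ) := by
        have : Nat.factorial (j + 2) = (j + 2) * Nat.factorial (j + 1) := rfl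
        rw [this]; push_cast; ring
      have hk : ((j : ℤ) + 1) + 1 = ((j + 1 : ℕ) : ℤ) + 1 := by push_cast; ring
      rw [hmul, hk]
      apply ih (j + 1)
      have h1 := Nat.factorial_pos (j + 1)
      have h2 : Nat.factorial (j + 2) = (j + 2) * Nat.factorial (j + 1) := rfl
      nlinarith
    · rw [if_neg (by exact_mod_cast h), dif_neg h]
      simp

lemma foldl_cast (l : List ℕ) : ∀ r : ℕ,
    (l.map (Nat.cast : ℕ → ℤ)).foldl (fun r f => if f ≤ r then r - f else r) (r : ℤ) =
      ((subN l r : ℕ) : ℤ) := by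
  induction l with
  | nil => intro r; simp [subN]
  | cons f l ih =>
    intro r
    simp only [List.map_cons, List.foldl_cons, subN] at *
    by_cases h : f ≤ r
    · rw [if_pos (by exact_mod_cast h), if_pos h]
      have : (r : ℤ) - (f : ℤ) = ((r - f : ℕ) : ℤ) := by omega
      rw [this]; exact ih (r - f)
    · rw [if_neg (by exact_mod_cast h), if_neg h]
      exact ih r

lemma solve_alt_nonneg (n : ℕ) : solve_alt (n : ℤ) = decide (subN ((tbl n 0).reverse) n = 0) := by
  unfold solve_alt
  have htn : ((n : ℤ)).toNat = n := Int.toNat_natCast n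
  simp only [htn]
  have h1 : buildB (n + 2) (n : ℤ) 1 1 = (tbl n 0).map (Nat.cast : ℕ → ℤ) := by
    have := buildB_eq n (n + 2) 0 (by have := Nat.factorial_pos 1; omega)
    simpa [Nat.factorial] using this
  rw [h1, ← List.map_reverse, foldl_cast]
  simp

lemma solve_alt_neg (n : ℤ) (hn : n < 0) : solve_alt n = false := by
  unfold solve_alt
  have ht : n.toNat = 0 := Int.toNat_of_nonpos (by omega)
  have hb : buildB (n.toNat + 2) n 1 1 = [] := by
    rw [ht]
    show (if (1 : ℤ) ≤ n then _ else []) = []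
    rw [if_neg (by omega)]
  simp only [hb, List.reverse_nil, List.foldl_nil]
  exact decide_eq_false (by omega)

-- ===== VERDICT (by name: the statement is the Claim_ definition above) =====
theorem solve_spec : Claim_equal_solve := by
  unfold Claim_equal_solve Spec_solve
  intro n _
  by_cases hn : 0 ≤ n
  · obtain ⟨m, rfl⟩ : ∃ m : ℕ, n = (m : ℤ) := ⟨n.toNat, (Int.toNat_of_nonneg hn).symm⟩
    rw [solve_nonneg, solve_alt_nonneg, main_nat]
  · push_neg at hn
    rw [solve_alt_neg n hn]
    unfold solve
    rw [pyGoA, if_neg (by omega)]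
    have hm : PySem.Int.mod n 1 = 0 := by
      obtain ⟨h1, h2⟩ := pymod_bounds n 1 (by omega)
      omega
    have hdv : PySem.Int.floordiv n 1 = n := by
      have := PySem.Int.floordiv_mul_add_mod n 1
      rw [hm] at this; omega
    rw [hm, hdv, if_pos (by omega)]
    exact goA_neg n.natAbs (n.natAbs + 3) n (1 + 1) rfl hn (by omega) (by omega)
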